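-- pv_equiv track=rewrite | github.com/blegloannec/CodeProblems | HackerRank/basic_cryptanalysis.py | sig
-- ===== SOURCE A (Python) =====
-- def sig(W):
--     S = {}
--     SW = []
--     for c in W:
--         if c not in S:
--             S[c] = len(S)
--         SW.append(S[c])
--     return tuple(SW)
-- ===== SOURCE B (Python) =====
-- def sig(W):
--     W = list(W)
--     rank = {c: len(set(W[:W.index(c)])) for c in set(W)}
--     return tuple(rank[c] for c in W)
-- ===== Notes on version B (the rewrite author's own statement) =====
-- stated objective: alternative
-- what changed: Drops A's incrementally built running-counter dict: each distinct character's rank is computed independently as the number of distinct characters preceding its first occurrence, len(set(W[:W.index(c)])), and the input is then mapped through these precomputed ranks.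
import Mathlib
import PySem

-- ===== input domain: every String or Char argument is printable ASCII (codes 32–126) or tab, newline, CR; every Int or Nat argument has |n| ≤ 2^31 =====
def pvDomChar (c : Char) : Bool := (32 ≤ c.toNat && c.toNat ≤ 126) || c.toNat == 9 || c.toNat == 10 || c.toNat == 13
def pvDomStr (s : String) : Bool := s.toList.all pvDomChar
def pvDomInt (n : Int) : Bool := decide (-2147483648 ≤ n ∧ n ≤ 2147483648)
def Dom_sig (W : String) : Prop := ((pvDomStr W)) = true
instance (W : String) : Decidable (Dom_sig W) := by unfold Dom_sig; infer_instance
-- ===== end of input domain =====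

-- B drops A's incrementally built char→rank dict: each output element is computed directly as
-- the number of distinct characters before that character's first occurrence; objective: alternative.

-- ===== PORT A =====
-- one loop over W, building dict S and output list SW together; Python's S[c] after the
-- conditional insert never misses, so `getD _ 0` is exact here
def sig (W : String) : List Int :=
  (W.toList.foldl
    (fun (st : PySem.Dict Char Int × List Int) c =>
      let S := if st.1.contains c then st.1 else st.1.insert c (st.1.size : Int)
      (S, st.2 ++ [S.getD c 0]))
    (PySem.Dict.empty, [])).2

-- ===== PORT B =====
-- rank[c] = len(set(W[:W.index(c)])) computed once per distinct character (iterating set(W);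
-- the dict is only looked up afterwards, so set order does not matter), then W mapped through it;
-- W.index(c) never raises since c ∈ W, so `getD 0` is exact, and rank[c] never misses
def sig_alt (W : String) : List Int :=
  let L := W.toList
  let rank : PySem.Dict Char Int :=
    (PySem.Set.ofList L).foldl
      (fun d c => d.insert c
        ((PySem.Set.ofList (L.take ((PySem.List.index? L c).getD 0))).length : Int))
      PySem.Dict.empty
  L.map (fun c => rank.getD c 0)

-- ===== PRECONDITION & SPEC =====
def Spec_sig (W : String) (out : List Int) : Prop := out = sig_alt W
instance (W : String) (out : List Int) : Decidable (Spec_sig W out) := by unfold Spec_sig; infer_instance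

-- ===== CLAIM (what is proved, stated in full; the proofs are below) =====
def Claim_equal_sig : Prop := ∀ (W : String), Dom_sig W → Spec_sig W (sig W)

-- ===== LEMMAS AND PROOFS =====

-- A's dict after processing a distinct-character list ds, abstracted
def mapOf (ds : List Char) : PySem.Dict Char Int :=
  (PySem.List.enumerate ds 0).foldl (fun d p => d.insert p.2 p.1) PySem.Dict.empty

theorem enumerate_append_singleton (ds : List Char) (s : Int) (c : Char) :
    PySem.List.enumerate (ds ++ [c]) s
      = PySem.List.enumerate ds s ++ [((s + ds.length : Int), c)] := by
  induction ds generalizing s with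
  | nil => simp [PySem.List.enumerate_cons, PySem.List.enumerate_nil]
  | cons x xs ih => simp [PySem.List.enumerate_cons, ih]; ring_nf

theorem enumerate_mem_idxOf (ds : List Char) (s : Int) (c : Char) (h : c ∈ ds) :
    ((s + ds.idxOf c : Int), c) ∈ PySem.List.enumerate ds s := by
  induction ds generalizing s with
  | nil => simp at h
  | cons x xs ih =>
    rcases eq_or_ne c x with rfl | hne
    · simp [PySem.List.enumerate_cons, List.idxOf_cons_self]
    · rw [List.idxOf_cons_ne _ (Ne.symm hne)]
      simp only [PySem.List.enumerate_cons, List.mem_cons]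
      right
      have := ih (s + 1) (by simpa [hne] using h)
      convert this using 2
      push_cast; ring

theorem items_mapOf (ds : List Char) (hnd : ds.Nodup) :
    (mapOf ds).items = (PySem.List.enumerate ds 0).map (fun p => (p.2, p.1)) := by
  have h := PySem.Dict.items_foldl_insert_fresh (ν := Int) (PySem.List.enumerate ds 0)
    (fun p => p.2) (fun p => p.1) PySem.Dict.empty
    (fun a _ => PySem.Dict.contains_empty _)
    (by rw [PySem.List.map_snd_enumerate]; exact hnd)
  simpa [mapOf] using h

theorem keys_mapOf (ds : List Char) (hnd : ds.Nodup) : (mapOf ds).keys = ds := by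
  show ((mapOf ds).items.map (·.1)) = ds
  rw [items_mapOf ds hnd, List.map_map]
  exact PySem.List.map_snd_enumerate ds 0

theorem contains_mapOf (ds : List Char) (hnd : ds.Nodup) (c : Char) :
    (mapOf ds).contains c = decide (c ∈ ds) := by
  rw [PySem.Dict.contains_eq_decide_mem_keys, keys_mapOf ds hnd]

theorem getD_mapOf (ds : List Char) (hnd : ds.Nodup) (c : Char) (h : c ∈ ds) :
    (mapOf ds).getD c 0 = (ds.idxOf c : Int) := by
  apply PySem.Dict.getD_of_mem_items
  · rw [items_mapOf ds hnd]
    have := enumerate_mem_idxOf ds 0 c h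
    exact List.mem_map.2 ⟨_, this, by simp⟩
  · rw [keys_mapOf ds hnd]; exact hnd

theorem size_mapOf (ds : List Char) (hnd : ds.Nodup) : (mapOf ds).size = ds.length := by
  show (mapOf ds).items.length = ds.length
  rw [items_mapOf ds hnd, List.length_map]
  exact PySem.List.length_enumerate ds 0

theorem mapOf_snoc (ds : List Char) (c : Char) :
    mapOf (ds ++ [c]) = (mapOf ds).insert c (ds.length : Int) := by
  unfold mapOf
  rw [enumerate_append_singleton, List.foldl_append]
  simp

theorem idxOf_update_of_mem (ds rest : List Char) (c : Char) (h : c ∈ ds) :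
    (PySem.Set.update ds rest).idxOf c = ds.idxOf c := by
  rw [PySem.Set.update_eq_append_filter]
  exact List.idxOf_append_of_mem h

-- main invariant of A's loop: starting from the table of a distinct prefix ds,
-- the loop extends ds to PySem.Set.update ds rest and emits first-occurrence ranks
theorem sig_loop_inv (rest : List Char) : ∀ (ds : List Char), ds.Nodup → ∀ (SW : List Int),
    rest.foldl
      (fun (st : PySem.Dict Char Int × List Int) c =>
        let S := if st.1.contains c then st.1 else st.1.insert c (st.1.size : Int)
        (S, st.2 ++ [S.getD c 0]))
      (mapOf ds, SW)
    = (mapOf (PySem.Set.update ds rest),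
       SW ++ rest.map (fun c => ((PySem.Set.update ds rest).idxOf c : Int))) := by
  induction rest with
  | nil => intro ds _ SW; simp [PySem.Set.update]
  | cons c rest ih =>
    intro ds hnd SW
    rw [List.foldl_cons]
    by_cases hc : c ∈ ds
    · have hupd : PySem.Set.update ds (c :: rest) = PySem.Set.update ds rest := by
        rw [PySem.Set.update_cons]; simp [PySem.Set.add, hc]
      simp only [contains_mapOf ds hnd, decide_eq_true_eq, hc, if_true]
      rw [getD_mapOf ds hnd c hc, ih ds hnd, hupd]
      rw [List.map_cons, idxOf_update_of_mem ds rest c hc]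
      simp only [List.append_assoc, List.singleton_append]
    · have hupd : PySem.Set.update ds (c :: rest) = PySem.Set.update (ds ++ [c]) rest := by
        rw [PySem.Set.update_cons]; simp [PySem.Set.add, hc]
      have hnd' : (ds ++ [c]).Nodup := by
        simp only [List.nodup_append, List.nodup_singleton, true_and]
        exact ⟨hnd, fun a ha e he heq => by simp only [List.mem_singleton] at he; subst he; exact hc (heq ▸ ha)⟩
      have hcmem : c ∈ ds ++ [c] := by simp
      simp only [contains_mapOf ds hnd, decide_eq_true_eq, hc, if_false]
      rw [size_mapOf ds hnd, ← mapOf_snoc ds c]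
      rw [getD_mapOf (ds ++ [c]) hnd' c hcmem, ih (ds ++ [c]) hnd', hupd]
      have hidx : (ds ++ [c]).idxOf c = ds.length := by
        simp [List.idxOf_append, List.idxOf_eq_length_iff.2 hc]
      rw [List.map_cons, idxOf_update_of_mem (ds ++ [c]) rest c hcmem, hidx]
      simp only [List.append_assoc, List.singleton_append]

-- bridge to B: the first-occurrence rank of c in L equals the number of distinct
-- characters in the prefix of L before c's first occurrence
theorem ofList_idxOf_eq_length_take (L : List Char) (c : Char) (h : c ∈ L) :
    (PySem.Set.ofList L).idxOf c
      = (PySem.Set.ofList (L.take ((PySem.List.index? L c).getD 0))).length := by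
  obtain ⟨k, hk⟩ := Option.isSome_iff_exists.1 ((PySem.List.index?_isSome_iff L c).2 h)
  obtain ⟨pre, suf, hL, hlen, hpre⟩ := (PySem.List.index?_eq_some_iff L c k).1 hk
  subst hL
  rw [hk, Option.getD_some, ← hlen, List.take_left]
  have hcnot : c ∉ PySem.Set.ofList pre := fun hm => hpre ((PySem.Set.mem_ofList _ _).1 hm)
  rw [PySem.Set.ofList_append, PySem.Set.update_cons]
  have hadd : PySem.Set.add (PySem.Set.ofList pre) c = PySem.Set.ofList pre ++ [c] := by
    simp only [PySem.Set.add]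
    rw [if_neg (by simpa [PySem.Set.contains_iff] using hcnot)]
  rw [hadd, idxOf_update_of_mem _ suf c (by simp)]
  simp [List.idxOf_append, hcnot]

-- B's rank dict: a fold of fresh inserts over the distinct characters, so getD reads off the formula
theorem getD_rank (L : List Char) (f : Char → Int) (c : Char) (h : c ∈ L) :
    ((PySem.Set.ofList L).foldl (fun d x => d.insert x (f x)) PySem.Dict.empty).getD c 0 = f c := by
  have hitems := PySem.Dict.items_foldl_insert_fresh (ν := Int) (PySem.Set.ofList L)
    (fun x => x) (fun x => f x) PySem.Dict.empty
    (fun a _ => PySem.Dict.contains_empty _)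
    (by simpa using PySem.Set.nodup_ofList L)
  have hemp : (PySem.Dict.empty : PySem.Dict Char Int).items = [] := rfl
  apply PySem.Dict.getD_of_mem_items
  · rw [hitems, hemp, List.nil_append]
    exact List.mem_map.2 ⟨c, (PySem.Set.mem_ofList _ _).2 h, rfl⟩
  · show (_ : PySem.Dict Char Int).items.map (·.1) |>.Nodup
    rw [hitems, hemp, List.nil_append, List.map_map]
    have hid : ((fun x : Char × Int => x.1) ∘ fun a : Char => (a, f a)) = id := rfl
    rw [hid, List.map_id]
    exact PySem.Set.nodup_ofList L

-- ===== VERDICT (by name: the statement is the Claim_ definition above) =====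
theorem sig_spec : Claim_equal_sig := by
  intro W _
  show sig W = sig_alt W
  unfold sig sig_alt
  have h0 : (PySem.Dict.empty : PySem.Dict Char Int) = mapOf [] := rfl
  conv_lhs => rw [h0, sig_loop_inv W.toList [] List.nodup_nil [], PySem.Set.update_nil_left]
  simp only [List.nil_append]
  apply List.map_congr_left
  intro c hc
  rw [getD_rank W.toList _ c hc, ofList_idxOf_eq_length_take W.toList c hc]
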